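-- pv_equiv track=rewrite | github.com/inaciovasquez2020/chronos-urf-rr | toolkit/oblivion/scripts/cfi_holonomy_test.py | cycle_rank
-- ===== SOURCE A (Python) =====
-- from typing import Dict, Iterable, List, Set, Tuple
--
-- Vertex = str
--
-- Graph = Dict[Vertex, Set[Vertex]]
--
-- def num_edges(G: Graph) -> int:
--     return sum(len(G[v]) for v in G) // 2
--
-- def cycle_rank(G: Graph) -> int:
--     seen: Set[Vertex] = set()
--     comps = 0
--     for s in G:
--         if s in seen:
--             continue
--         comps += 1
--         q = [s]
--         seen.add(s)
--         while q:
--             x = q.pop()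
--             for y in G[x]:
--                 if y not in seen:
--                     seen.add(y)
--                     q.append(y)
--     return num_edges(G) - len(G) + comps
-- ===== SOURCE B (Python) =====
-- def num_edges(G):
--     return sum(map(len, G.values())) // 2
--
-- def cycle_rank(G):
--     seen = set()
--     comps = 0
--     for s in G:
--         if s not in seen:
--             comps += 1
--             frontier = {s}
--             seen |= frontier
--             while frontier:
--                 frontier = {y for x in frontier for y in G[x]} - seen
--                 seen |= frontier
--     return num_edges(G) - len(G) + comps
-- ===== Notes on version B (the rewrite author's own statement) =====
-- stated objective: alternative
-- what changed: Per-component exploration is rewritten from an explicit-stack DFS with per-vertex membership tests and pushes to a level-synchronous frontier-set BFS using whole-set comprehensions and set algebra (frontier = neighbours-of-frontier minus seen); num_edges sums over values instead of indexing by key. Pre_ keeps only faithful encodings of the Python input (association list with distinct keys, neighbour lists with distinct elements, i.e. a dict of sets) and excludes graphs with a neighbour that is not a key, on which both A and B raise KeyError.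
import Mathlib
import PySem

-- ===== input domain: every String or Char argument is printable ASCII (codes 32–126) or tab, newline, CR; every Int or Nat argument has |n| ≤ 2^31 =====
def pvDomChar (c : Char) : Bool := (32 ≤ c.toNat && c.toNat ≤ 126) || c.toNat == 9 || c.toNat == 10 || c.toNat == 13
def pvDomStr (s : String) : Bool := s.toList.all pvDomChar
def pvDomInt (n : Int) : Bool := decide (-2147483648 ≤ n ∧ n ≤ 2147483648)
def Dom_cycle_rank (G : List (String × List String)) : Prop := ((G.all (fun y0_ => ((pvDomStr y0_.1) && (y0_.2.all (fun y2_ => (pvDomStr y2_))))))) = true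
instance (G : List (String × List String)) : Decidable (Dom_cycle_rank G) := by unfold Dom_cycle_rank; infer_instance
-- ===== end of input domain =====

-- B replaces A's explicit-stack DFS component search with a level-synchronous frontier-set BFS
-- (whole-set comprehension and set algebra per level); same asymptotic cost, alternative algorithm.


-- Shared transliteration of the Python dict lookup G[x] (total form; Pre_ guarantees every
-- looked-up vertex is a key, i.e. the default [] is never what the Python would raise on).
def pvNbrs (G : List (String × List String)) (x : String) : List String :=
  (PySem.Dict.mk G).getD x []

-- ---- termination bookkeeping for the two search loops (used by decreasing_by, so stated before the ports) ----
def pvUniv (G : List (String × List String)) : List String :=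
  G.map Prod.fst ++ G.flatMap Prod.snd

def pvUnseen (G : List (String × List String)) (seen : List String) : Nat :=
  ((pvUniv G).filter (fun v => decide (v ∉ seen))).length

theorem pvNbrs_cases (G : List (String × List String)) (x : String) :
    pvNbrs G x = [] ∨ ∃ p ∈ G, p.1 = x ∧ pvNbrs G x = p.2 := by
  induction G with
  | nil => left; rfl
  | cons p G ih =>
    obtain ⟨k, vs⟩ := p
    by_cases h : k = x
    · right
      refine ⟨(k, vs), by simp, h, ?_⟩
      simp [pvNbrs, PySem.Dict.getD_eq_get?_getD, PySem.Dict.get?_mk_cons, h]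
    · have heq : pvNbrs ((k, vs) :: G) x = pvNbrs G x := by
        simp [pvNbrs, PySem.Dict.getD_eq_get?_getD, PySem.Dict.get?_mk_cons, h]
      rcases ih with h0 | ⟨q, hq, hq1, hq2⟩
      · left; rw [heq, h0]
      · right; exact ⟨q, by simp [hq], hq1, by rw [heq, hq2]⟩

theorem pvNbrs_mem_univ (G : List (String × List String)) (x y : String)
    (hy : y ∈ pvNbrs G x) : y ∈ pvUniv G := by
  rcases pvNbrs_cases G x with h | ⟨p, hp, _, h2⟩
  · simp [h] at hy
  · rw [h2] at hy
    simp only [pvUniv, List.mem_append, List.mem_flatMap]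
    exact Or.inr ⟨p, hp, hy⟩

theorem pv_filter_length_lt {l seen : List String} {y : String}
    (hyl : y ∈ l) (hys : y ∉ seen) :
    ((l.filter (fun v => decide (v ∉ seen ++ [y]))).length <
      (l.filter (fun v => decide (v ∉ seen))).length) := by
  rw [← List.countP_eq_length_filter, ← List.countP_eq_length_filter]
  obtain ⟨s, t, rfl⟩ := List.append_of_mem hyl
  have h1 : ∀ u : List String, u.countP (fun v => decide (v ∉ seen ++ [y])) ≤ u.countP (fun v => decide (v ∉ seen)) := by
    intro u
    rw [List.countP_eq_length_filter, List.countP_eq_length_filter]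
    exact List.Sublist.length_le (List.monotone_filter_right u (fun v hv => by simp at hv ⊢; exact hv.1))
  have h2 := h1 s
  have h3 := h1 t
  simp only [List.countP_append, List.countP_cons]
  have hy1 : (decide (y ∉ seen ++ [y])) = false := by simp
  have hy2 : (decide (y ∉ seen)) = true := by simpa using hys
  rw [hy1, hy2]
  simp only [Bool.false_eq_true, if_false, if_true]
  omega

theorem pvUnseen_add_lt (G : List (String × List String)) (seen : List String) (y : String)
    (hy : y ∈ pvUniv G) (hys : y ∉ seen) :
    pvUnseen G (seen ++ [y]) < pvUnseen G seen :=
  pv_filter_length_lt hy hys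

-- ===== PORT A =====
-- inner 'for y in G[x]: if y not in seen: seen.add(y); q.append(y)' (stack top kept at the head)
def dfsPush (seen : PySem.Set String) (q : List String) :
    List String → PySem.Set String × List String
  | [] => (seen, q)
  | y :: ys =>
    if y ∈ seen then dfsPush seen q ys
    else dfsPush (PySem.Set.add seen y) (y :: q) ys

theorem dfsPush_measure (G : List (String × List String)) :
    ∀ (nbrs : List String) (seen : PySem.Set String) (q : List String),
      (∀ y ∈ nbrs, y ∈ pvUniv G) →
      2 * pvUnseen G (dfsPush seen q nbrs).1 + (dfsPush seen q nbrs).2.length ≤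
        2 * pvUnseen G seen + q.length := by
  intro nbrs
  induction nbrs with
  | nil => intro seen q _; simp [dfsPush]
  | cons y ys ih =>
    intro seen q hsub
    by_cases hy : y ∈ seen
    · simpa [dfsPush, hy] using ih seen q (fun z hz => hsub z (by simp [hz]))
    · have h1 := ih (PySem.Set.add seen y) (y :: q) (fun z hz => hsub z (by simp [hz]))
      have h2 : pvUnseen G (PySem.Set.add seen y) < pvUnseen G seen := by
        rw [PySem.Set.add_of_not_mem hy]
        exact pvUnseen_add_lt G seen y (hsub y (by simp)) hy
      simp only [dfsPush, hy, if_false, List.length_cons] at h1 ⊢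
      omega

-- 'while q: x = q.pop(); for y in G[x]: …'
def dfsLoop (G : List (String × List String)) (seen : PySem.Set String) (q : List String) :
    PySem.Set String :=
  match q with
  | [] => seen
  | x :: q' =>
    let p := dfsPush seen q' (pvNbrs G x)
    dfsLoop G p.1 p.2
termination_by 2 * pvUnseen G seen + q.length
decreasing_by
  have := dfsPush_measure G (pvNbrs G x) seen q'
    (fun y hy => pvNbrs_mem_univ G x y hy)
  simp only [List.length_cons]
  omega

-- sum(len(G[v]) for v in G) // 2
def num_edges (G : List (String × List String)) : Int :=
  PySem.Int.floordiv
    ((G.map Prod.fst).foldl (fun acc v => acc + PySem.List.len (pvNbrs G v)) 0) 2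

def cycle_rank (G : List (String × List String)) : Int :=
  let st := (G.map Prod.fst).foldl
    (fun (st : PySem.Set String × Int) s =>
      if s ∈ st.1 then st
      else (dfsLoop G (PySem.Set.add st.1 s) [s], st.2 + 1))
    (PySem.Set.empty, 0)
  num_edges G - (G.length : Int) + st.2

-- ===== PORT B =====
-- measure bookkeeping for the BFS loop (cited by decreasing_by below)
theorem bfs_measure (G : List (String × List String)) (seen fl : List String)
    (hsub : ∀ y ∈ fl, y ∈ pvUniv G) :
    pvUnseen G (PySem.Set.union seen (PySem.Set.diff (PySem.Set.ofList fl) seen)) +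
      (PySem.Set.diff (PySem.Set.ofList fl) seen).length ≤ pvUnseen G seen := by
  have hnodup : (PySem.Set.diff (PySem.Set.ofList fl) seen).Nodup :=
    PySem.Set.nodup_diff _ _ (PySem.Set.nodup_ofList _)
  have hfresh : ∀ y ∈ PySem.Set.diff (PySem.Set.ofList fl) seen, y ∈ pvUniv G ∧ y ∉ seen := by
    intro y hy
    rw [PySem.Set.mem_diff] at hy
    rcases hy with ⟨h1, h2⟩
    rw [PySem.Set.mem_ofList] at h1
    exact ⟨hsub y h1, h2⟩
  have hkey : ∀ (l s : List String), l.Nodup → (∀ y ∈ l, y ∈ pvUniv G ∧ y ∉ s) →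
      pvUnseen G (s ++ l) + l.length ≤ pvUnseen G s := by
    intro l
    induction l with
    | nil => intro s _ _; simp
    | cons y ys ih =>
      intro s hnd hys
      have h1 : pvUnseen G (s ++ [y]) < pvUnseen G s :=
        pvUnseen_add_lt G s y (hys y (by simp)).1 (hys y (by simp)).2
      have h2 := ih (s ++ [y]) hnd.of_cons (by
        intro z hz
        refine ⟨(hys z (by simp [hz])).1, ?_⟩
        simp only [List.mem_append, List.mem_singleton]
        rintro (hzs | rfl)
        · exact (hys z (by simp [hz])).2 hzs
        · exact (List.nodup_cons.mp hnd).1 hz)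
      have h3 : s ++ y :: ys = (s ++ [y]) ++ ys := by simp
      rw [h3]
      simp only [List.length_cons]
      omega
  have hunion : PySem.Set.union seen (PySem.Set.diff (PySem.Set.ofList fl) seen) =
      seen ++ PySem.Set.diff (PySem.Set.ofList fl) seen :=
    PySem.Set.update_eq_append_of_disjoint seen _ hnodup (fun y hy => (hfresh y hy).2)
  rw [hunion]
  exact hkey _ seen hnodup hfresh

-- 'while frontier: frontier = {y for x in frontier for y in G[x]} - seen; seen |= frontier'
def bfsClosure (G : List (String × List String)) (seen frontier : PySem.Set String) :
    PySem.Set String :=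
  if frontier = [] then seen
  else
    let nxt := PySem.Set.diff (PySem.Set.ofList (frontier.flatMap (fun x => pvNbrs G x))) seen
    bfsClosure G (PySem.Set.union seen nxt) nxt
termination_by 2 * pvUnseen G seen + frontier.length
decreasing_by
  rename_i hne
  simp only [List.flatMap_subtype, List.unattach_attach]
  have hf : 1 ≤ frontier.length := by
    cases frontier with
    | nil => exact absurd rfl hne
    | cons a l => simp
  have h := bfs_measure G seen (frontier.flatMap (pvNbrs G))
    (by intro y hy
        rcases List.mem_flatMap.mp hy with ⟨x, _, hx⟩
        exact pvNbrs_mem_univ G x y hx)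
  omega

-- sum(map(len, G.values())) // 2
def num_edges_alt (G : List (String × List String)) : Int :=
  PySem.Int.floordiv (((G.map Prod.snd).map PySem.List.len).sum) 2

def cycle_rank_alt (G : List (String × List String)) : Int :=
  let st := (G.map Prod.fst).foldl
    (fun (st : PySem.Set String × Int) s =>
      if s ∈ st.1 then st
      else (bfsClosure G (PySem.Set.add st.1 s) [s], st.2 + 1))
    (PySem.Set.empty, 0)
  num_edges_alt G - (G.length : Int) + st.2

-- ===== PRECONDITION & SPEC =====
-- Pre_ keeps only faithful encodings of the Python input — an association list with distinct
-- keys and neighbour lists with distinct elements (a dict of sets has exactly those) — and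
-- excludes graphs with a neighbour that is not a key, on which the Python A raises KeyError.
def Pre_cycle_rank (G : List (String × List String)) : Prop :=
  (G.map Prod.fst).Nodup ∧ (∀ p ∈ G, p.2.Nodup) ∧
    (∀ p ∈ G, ∀ y ∈ p.2, y ∈ G.map Prod.fst)
instance (G : List (String × List String)) : Decidable (Pre_cycle_rank G) := by
  unfold Pre_cycle_rank; infer_instance

def pvWitness_cycle_rank : (List (String × List String)) :=
  [("a", ["b"]), ("b", ["a", "c"]), ("c", ["b"]), ("d", [])]

def Spec_cycle_rank (G : List (String × List String)) (out : Int) : Prop := out = cycle_rank_alt G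
instance (G : List (String × List String)) (out : Int) : Decidable (Spec_cycle_rank G out) := by
  unfold Spec_cycle_rank; infer_instance

-- ===== CLAIM (what is proved, stated in full; the proofs are below) =====
def Claim_equal_cycle_rank : Prop := ∀ (G : List (String × List String)), Dom_cycle_rank G → Pre_cycle_rank G → Spec_cycle_rank G (cycle_rank G)

-- ===== LEMMAS AND PROOFS =====

-- Vertices reachable (in ≥ 0 steps) from the work list q; both searches add exactly these.
inductive RReach (G : List (String × List String)) (q : List String) : String → Prop
  | base {x : String} : x ∈ q → RReach G q x
  | step {x y : String} : RReach G q x → y ∈ pvNbrs G x → RReach G q y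

theorem RReach_nil {G : List (String × List String)} {v : String} : ¬ RReach G [] v := by
  intro h
  induction h with
  | base hx => simp at hx
  | step _ _ ih => exact ih

-- Invariant of both searches: the work list is already marked seen, and every seen vertex
-- not still on the work list has all its neighbours seen.
def GoodSt (G : List (String × List String)) (seen q : List String) : Prop :=
  (∀ x ∈ q, x ∈ seen) ∧ (∀ x ∈ seen, x ∈ q ∨ ∀ y ∈ pvNbrs G x, y ∈ seen)

theorem dfsPush_fst_mem :
    ∀ (nbrs : List String) (seen q : List String) (v : String),
      v ∈ (dfsPush seen q nbrs).1 ↔ v ∈ seen ∨ v ∈ nbrs := by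
  intro nbrs
  induction nbrs with
  | nil => intro seen q v; simp [dfsPush]
  | cons y ys ih =>
    intro seen q v
    by_cases hy : y ∈ seen
    · rw [show dfsPush seen q (y :: ys) = dfsPush seen q ys by simp [dfsPush, hy], ih]
      by_cases hv : v = y <;> simp [hv, hy]
    · rw [show dfsPush seen q (y :: ys) = dfsPush (PySem.Set.add seen y) (y :: q) ys by
        simp [dfsPush, hy], ih]
      by_cases hv : v = y <;> simp [hv, PySem.Set.mem_add]

theorem dfsPush_snd_mem :
    ∀ (nbrs : List String) (seen q : List String) (v : String),
      v ∈ (dfsPush seen q nbrs).2 ↔ v ∈ q ∨ (v ∈ nbrs ∧ v ∉ seen) := by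
  intro nbrs
  induction nbrs with
  | nil => intro seen q v; simp [dfsPush]
  | cons y ys ih =>
    intro seen q v
    by_cases hy : y ∈ seen
    · rw [show dfsPush seen q (y :: ys) = dfsPush seen q ys by simp [dfsPush, hy], ih]
      by_cases hv : v = y <;> simp [hv, hy]
    · rw [show dfsPush seen q (y :: ys) = dfsPush (PySem.Set.add seen y) (y :: q) ys by
        simp [dfsPush, hy], ih]
      by_cases hv : v = y <;> simp [hv, hy]

theorem goodSt_step (G : List (String × List String)) (seen : List String) (x : String)
    (q' : List String) (hg : GoodSt G seen (x :: q')) :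
    GoodSt G (dfsPush seen q' (pvNbrs G x)).1 (dfsPush seen q' (pvNbrs G x)).2 := by
  constructor
  · intro z hz
    rw [dfsPush_snd_mem] at hz
    rw [dfsPush_fst_mem]
    rcases hz with hzq | ⟨hzn, _⟩
    · exact Or.inl (hg.1 z (by simp [hzq]))
    · exact Or.inr hzn
  · intro z hz
    rw [dfsPush_fst_mem] at hz
    by_cases hzs : z ∈ seen
    · rcases hg.2 z hzs with hzq | hcl
      · rcases List.mem_cons.mp hzq with rfl | hzq'
        · right; intro y hy; rw [dfsPush_fst_mem]; exact Or.inr hy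
        · left; rw [dfsPush_snd_mem]; exact Or.inl hzq'
      · right; intro y hy; rw [dfsPush_fst_mem]; exact Or.inl (hcl y hy)
    · have hzn : z ∈ pvNbrs G x := by tauto
      left; rw [dfsPush_snd_mem]; exact Or.inr ⟨hzn, hzs⟩

theorem dfs_reach_back (G : List (String × List String)) (seen : List String) (x : String)
    (q' : List String) (hg : GoodSt G seen (x :: q')) :
    ∀ v, RReach G (dfsPush seen q' (pvNbrs G x)).2 v → v ∈ seen ∨ RReach G (x :: q') v := by
  intro v h
  induction h with
  | base hz =>
    rw [dfsPush_snd_mem] at hz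
    rcases hz with hzq | ⟨hzn, _⟩
    · exact Or.inr (RReach.base (by simp [hzq]))
    · exact Or.inr (RReach.step (RReach.base (by simp)) hzn)
  | step hx hy ih =>
    rcases ih with hus | hur
    · rcases hg.2 _ hus with huq | hcl
      · rcases List.mem_cons.mp huq with rfl | huq'
        · exact Or.inr (RReach.step (RReach.base (by simp)) hy)
        · exact Or.inr (RReach.step (RReach.base (by simp [huq'])) hy)
      · exact Or.inl (hcl _ hy)
    · exact Or.inr (RReach.step hur hy)

theorem dfs_reach_fwd (G : List (String × List String)) (seen : List String) (x : String)
    (q' : List String) (hg : GoodSt G seen (x :: q')) :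
    ∀ v, RReach G (x :: q') v →
      v ∈ (dfsPush seen q' (pvNbrs G x)).1 ∨ RReach G (dfsPush seen q' (pvNbrs G x)).2 v := by
  intro v h
  induction h with
  | base hz =>
    rcases List.mem_cons.mp hz with rfl | hzq'
    · left; rw [dfsPush_fst_mem]; exact Or.inl (hg.1 _ (by simp))
    · right; exact RReach.base (by rw [dfsPush_snd_mem]; exact Or.inl hzq')
  | step hx hy ih =>
    rcases ih with hus | hur
    · rcases (goodSt_step G seen x q' hg).2 _ hus with huq | hcl
      · right; exact RReach.step (RReach.base huq) hy
      · left; exact hcl _ hy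
    · right; exact RReach.step hur hy

theorem dfsLoop_mem (G : List (String × List String)) :
    ∀ (seen : PySem.Set String) (q : List String), GoodSt G seen q →
      ∀ v, v ∈ dfsLoop G seen q ↔ v ∈ seen ∨ RReach G q v := by
  intro seen q
  fun_induction dfsLoop G seen q with
  | case1 seen =>
    intro _ v
    exact ⟨Or.inl, fun h => h.elim id (fun h' => (RReach_nil h').elim)⟩
  | case2 seen x q' p ih =>
    intro hg v
    rw [ih (goodSt_step G seen x q' hg) v]
    constructor
    · rintro (hv | hv)
      · rw [dfsPush_fst_mem] at hv
        rcases hv with h | h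
        · exact Or.inl h
        · exact Or.inr (RReach.step (RReach.base (by simp)) h)
      · exact dfs_reach_back G seen x q' hg v hv
    · rintro (hv | hv)
      · left; rw [dfsPush_fst_mem]; exact Or.inl hv
      · exact dfs_reach_fwd G seen x q' hg v hv

theorem bfs_good (G : List (String × List String)) (seen frontier N SU : List String)
    (hg : GoodSt G seen frontier)
    (hN : ∀ v, v ∈ N ↔ (∃ x ∈ frontier, v ∈ pvNbrs G x) ∧ v ∉ seen)
    (hSU : ∀ v, v ∈ SU ↔ v ∈ seen ∨ v ∈ N) : GoodSt G SU N := by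
  constructor
  · intro z hz
    rw [hSU]
    exact Or.inr hz
  · intro z hz
    rw [hSU] at hz
    rcases hz with hzs | hzN
    · rcases hg.2 z hzs with hzf | hcl
      · right
        intro y hy
        rw [hSU]
        by_cases hys : y ∈ seen
        · exact Or.inl hys
        · exact Or.inr ((hN y).mpr ⟨⟨z, hzf, hy⟩, hys⟩)
      · right
        intro y hy
        rw [hSU]
        exact Or.inl (hcl y hy)
    · exact Or.inl hzN

theorem bfs_back (G : List (String × List String)) (seen frontier N : List String)
    (hg : GoodSt G seen frontier)
    (hN : ∀ v, v ∈ N ↔ (∃ x ∈ frontier, v ∈ pvNbrs G x) ∧ v ∉ seen) :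
    ∀ v, RReach G N v → v ∈ seen ∨ RReach G frontier v := by
  intro v h
  induction h with
  | base hz =>
    rcases (hN _).mp hz with ⟨⟨x, hx, hv⟩, _⟩
    exact Or.inr (RReach.step (RReach.base hx) hv)
  | step hx hy ih =>
    rcases ih with hus | hur
    · rcases hg.2 _ hus with huf | hcl
      · exact Or.inr (RReach.step (RReach.base huf) hy)
      · exact Or.inl (hcl _ hy)
    · exact Or.inr (RReach.step hur hy)

theorem bfs_fwd (G : List (String × List String)) (seen frontier N SU : List String)
    (hg : GoodSt G seen frontier)
    (hN : ∀ v, v ∈ N ↔ (∃ x ∈ frontier, v ∈ pvNbrs G x) ∧ v ∉ seen)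
    (hSU : ∀ v, v ∈ SU ↔ v ∈ seen ∨ v ∈ N) :
    ∀ v, RReach G frontier v → v ∈ SU ∨ RReach G N v := by
  intro v h
  induction h with
  | base hz => exact Or.inl ((hSU _).mpr (Or.inl (hg.1 _ hz)))
  | @step u y hx hy ih =>
    rcases ih with hus | hur
    · rw [hSU] at hus
      rcases hus with hus | huN
      · rcases hg.2 _ hus with huf | hcl
        · by_cases hys : y ∈ seen
          · exact Or.inl ((hSU _).mpr (Or.inl hys))
          · exact Or.inr (RReach.base ((hN _).mpr ⟨⟨_, huf, hy⟩, hys⟩))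
        · exact Or.inl ((hSU _).mpr (Or.inl (hcl _ hy)))
      · exact Or.inr (RReach.step (RReach.base huN) hy)
    · exact Or.inr (RReach.step hur hy)

theorem bfsClosure_mem (G : List (String × List String)) :
    ∀ (seen frontier : PySem.Set String), GoodSt G seen frontier →
      ∀ v, v ∈ bfsClosure G seen frontier ↔ v ∈ seen ∨ RReach G frontier v := by
  intro seen frontier
  fun_induction bfsClosure G seen frontier with
  | case1 seen =>
    intro _ v
    exact ⟨Or.inl, fun h => h.elim id (fun h' => (RReach_nil h').elim)⟩
  | case2 seen frontier h nxt ih =>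
    intro hg v
    have hAtt : nxt = PySem.Set.diff
        (PySem.Set.ofList (List.flatMap (fun (x : {x // x ∈ frontier}) => pvNbrs G x.1)
          frontier.attach)) seen := rfl
    have hNxtDef : nxt = PySem.Set.diff
        (PySem.Set.ofList (frontier.flatMap (fun x => pvNbrs G x))) seen := by
      rw [hAtt]
      simp [List.flatMap_subtype, List.unattach_attach]
    rw [hNxtDef] at ih
    show v ∈ bfsClosure G
        (PySem.Set.union seen
          (PySem.Set.diff (PySem.Set.ofList (frontier.flatMap (fun x => pvNbrs G x))) seen))
        (PySem.Set.diff (PySem.Set.ofList (frontier.flatMap (fun x => pvNbrs G x))) seen) ↔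
      v ∈ seen ∨ RReach G frontier v
    set N := PySem.Set.diff (PySem.Set.ofList (frontier.flatMap (fun x => pvNbrs G x))) seen
      with hNdef
    have hN : ∀ w, w ∈ N ↔ (∃ x ∈ frontier, w ∈ pvNbrs G x) ∧ w ∉ seen := by
      intro w
      rw [hNdef, PySem.Set.mem_diff, PySem.Set.mem_ofList]
      simp [List.mem_flatMap]
    have hSU : ∀ w, w ∈ PySem.Set.union seen N ↔ w ∈ seen ∨ w ∈ N := by
      intro w
      simp only [PySem.Set.mem_union]
    rw [ih (bfs_good G seen frontier N _ hg hN hSU)]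
    constructor
    · rintro (hv | hv)
      · rw [hSU] at hv
        rcases hv with h1 | h1
        · exact Or.inl h1
        · rcases (hN _).mp h1 with ⟨⟨x, hx, hv'⟩, _⟩
          exact Or.inr (RReach.step (RReach.base hx) hv')
      · exact bfs_back G seen frontier N hg hN v hv
    · rintro (hv | hv)
      · left; rw [hSU]; exact Or.inl hv
      · exact bfs_fwd G seen frontier N _ hg hN hSU v hv

theorem goodSt_of_char (G : List (String × List String)) (seen q R : List String)
    (hg : GoodSt G seen q) (hR : ∀ v, v ∈ R ↔ v ∈ seen ∨ RReach G q v) :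
    GoodSt G R [] := by
  refine ⟨by simp, ?_⟩
  intro x hx
  right
  intro y hy
  rcases (hR x).mp hx with hxs | hxr
  · rcases hg.2 x hxs with hxq | hcl
    · exact (hR y).mpr (Or.inr (RReach.step (RReach.base hxq) hy))
    · exact (hR y).mpr (Or.inl (hcl y hy))
  · exact (hR y).mpr (Or.inr (RReach.step hxr hy))

theorem outer_loop (G : List (String × List String)) :
    ∀ (ks : List String) (sA sB : List String) (c : Int),
      (∀ v, v ∈ sA ↔ v ∈ sB) → GoodSt G sA [] → GoodSt G sB [] →
      (ks.foldl (fun (st : PySem.Set String × Int) s =>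
        if s ∈ st.1 then st
        else (dfsLoop G (PySem.Set.add st.1 s) [s], st.2 + 1)) (sA, c)).2 =
      (ks.foldl (fun (st : PySem.Set String × Int) s =>
        if s ∈ st.1 then st
        else (bfsClosure G (PySem.Set.add st.1 s) [s], st.2 + 1)) (sB, c)).2 := by
  intro ks
  induction ks with
  | nil => intro sA sB c _ _ _; rfl
  | cons s ks ih =>
    intro sA sB c hmem hgA hgB
    have hGood0 : ∀ (t : List String), GoodSt G t [] → GoodSt G (PySem.Set.add t s) [s] := by
      intro t hgt
      constructor
      · intro z hz
        simp only [List.mem_singleton] at hz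
        subst hz
        rw [PySem.Set.mem_add]
        exact Or.inr rfl
      · intro z hz
        rw [PySem.Set.mem_add] at hz
        rcases hz with hzt | rfl
        · right
          intro y hy
          rcases hgt.2 z hzt with h0 | hcl
          · simp at h0
          · rw [PySem.Set.mem_add]
            exact Or.inl (hcl y hy)
        · left; simp
    by_cases hs : s ∈ sA
    · have hs' : s ∈ sB := (hmem s).mp hs
      simp only [List.foldl_cons, hs, hs', if_true]
      exact ih sA sB c hmem hgA hgB
    · have hs' : s ∉ sB := fun h => hs ((hmem s).mpr h)
      simp only [List.foldl_cons, hs, hs', if_false]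
      have hcA := dfsLoop_mem G (PySem.Set.add sA s) [s] (hGood0 sA hgA)
      have hcB := bfsClosure_mem G (PySem.Set.add sB s) [s] (hGood0 sB hgB)
      refine ih _ _ (c + 1) ?_ ?_ ?_
      · intro v
        rw [hcA v, hcB v, PySem.Set.mem_add, PySem.Set.mem_add]
        rw [hmem v]
      · exact goodSt_of_char G (PySem.Set.add sA s) [s] _ (hGood0 sA hgA) hcA
      · exact goodSt_of_char G (PySem.Set.add sB s) [s] _ (hGood0 sB hgB) hcB

theorem pvNbrs_key (G : List (String × List String)) (p : String × List String)
    (hp : p ∈ G) (hnd : (G.map Prod.fst).Nodup) : pvNbrs G p.1 = p.2 := by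
  unfold pvNbrs
  exact PySem.Dict.getD_of_mem_items (PySem.Dict.mk G) (by simpa using hp)
    (by simpa [PySem.Dict.keys_mk] using hnd) []

theorem num_edges_eq (G : List (String × List String))
    (hnd : (G.map Prod.fst).Nodup) : num_edges G = num_edges_alt G := by
  unfold num_edges num_edges_alt
  congr 1
  rw [PySem.List.foldl_add]
  simp only [zero_add, List.map_map]
  congr 1
  apply List.map_congr_left
  intro p hp
  simp only [Function.comp]
  rw [pvNbrs_key G p hp hnd]

-- ===== VERDICT (by name: the statement is the Claim_ definition above) =====
theorem cycle_rank_spec : Claim_equal_cycle_rank := by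
  intro G _ hpre
  unfold Spec_cycle_rank cycle_rank cycle_rank_alt
  have h := outer_loop G (G.map Prod.fst) PySem.Set.empty PySem.Set.empty 0
    (fun v => Iff.rfl) ⟨by simp, by simp [PySem.Set.empty]⟩ ⟨by simp, by simp [PySem.Set.empty]⟩
  simp only [h, num_edges_eq G hpre.1]
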